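-- pv_equiv track=rewrite | github.com/daniel-reich/ubiquitous-fiesta | EWZqYT4QGMYotfQTu_2.py | tap_code
-- ===== SOURCE A (Python) =====
-- def tap_code(text):
--     dic =  {"A": ". .", "B": ". ..", "C": ". ...","K": ". ...", "D": ". ....", "E":". .....",
--             "F": ".. .", "G":".. ..", "H":".. ...", "I":".. ....", "J":".. .....",
--             "L":"... .", "M":"... ..", "N":"... ...", "O":"... ....", "P":"... .....",
--             "Q":".... .", "R":".... ..", "S":".... ...", "T":".... ....", "U":".... .....",
--             "V":"..... .", "W":"..... ..", "X":"..... ...", "Y":"..... ....", "Z":"..... ....."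
--             }
--     r = ""
--     if "." in text:
--         dic = {v : k for k, v in dic.items() if k != "K"}
--         e, one = "", False
--         for i in text:
--             if i == " " and one:
--                 r += dic[e].lower()
--                 e, one = "", False
--             elif i == " ":
--                 one = True
--                 e += i
--             else:
--                 e += i
--         r += dic[e].lower() + " "
--     else:
--         text = text.upper()
--         for i in text:
--             r += dic[i] + " "
--     return r[:-1]
-- ===== SOURCE B (Python) =====
-- def tap_code(text):
--     ALPHA = "ABCDEFGHIJLMNOPQRSTUVWXYZ"
--     if "." in text:
--         toks = text.split(" ")
--         out = ""
--         for i in range(0, len(toks), 2):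
--             out += ALPHA[(len(toks[i]) - 1) * 5 + (len(toks[i + 1]) - 1)].lower()
--         return out
--     codes = []
--     for c in text.upper():
--         idx = ALPHA.index("C" if c == "K" else c)
--         codes.append("." * (idx // 5 + 1) + " " + "." * (idx % 5 + 1))
--     return " ".join(codes)
-- ===== Notes on version B (the rewrite author's own statement) =====
-- stated objective: alternative
-- what changed: B drops both dictionaries: it encodes by computing row/col dot counts arithmetically from the letter's index in the K-less alphabet string (idx//5+1, idx%5+1), and decodes by splitting on spaces once and mapping each consecutive token pair's dot counts back to a letter index, replacing A's dict literal, inverted-dict comprehension and stateful char-by-char scan with accumulator+flag.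
-- outside the precondition, e.g. on tap_code('.'): A raises KeyError, B raises IndexError; on tap_code('a1'): A raises KeyError, B raises ValueError
import Mathlib
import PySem

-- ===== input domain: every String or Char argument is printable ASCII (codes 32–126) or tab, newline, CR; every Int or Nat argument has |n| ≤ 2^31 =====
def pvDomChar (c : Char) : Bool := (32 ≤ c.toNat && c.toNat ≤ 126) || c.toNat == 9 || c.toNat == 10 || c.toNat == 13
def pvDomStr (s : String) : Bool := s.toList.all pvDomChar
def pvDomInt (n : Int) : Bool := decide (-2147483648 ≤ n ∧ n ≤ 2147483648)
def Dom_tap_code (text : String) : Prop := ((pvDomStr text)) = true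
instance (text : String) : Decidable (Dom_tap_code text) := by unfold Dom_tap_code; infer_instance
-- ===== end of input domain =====

-- B drops A's dictionaries entirely: it computes tap codes arithmetically from the letter's
-- index in the K-less alphabet (row = idx//5+1 dots, col = idx%5+1 dots) and decodes by
-- counting the dots in consecutive token pairs of text.split(" ") (objective: alternative).
-- Side effects: none (A rebinds locals only).

-- ===== PORT A =====
-- the tap-code dictionary literal of A, keys/values as char lists
def tapPairs : List (List Char × List Char) :=
  [("A".toList, ". .".toList), ("B".toList, ". ..".toList), ("C".toList, ". ...".toList),
   ("K".toList, ". ...".toList), ("D".toList, ". ....".toList), ("E".toList, ". .....".toList),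
   ("F".toList, ".. .".toList), ("G".toList, ".. ..".toList), ("H".toList, ".. ...".toList),
   ("I".toList, ".. ....".toList), ("J".toList, ".. .....".toList),
   ("L".toList, "... .".toList), ("M".toList, "... ..".toList), ("N".toList, "... ...".toList),
   ("O".toList, "... ....".toList), ("P".toList, "... .....".toList),
   ("Q".toList, ".... .".toList), ("R".toList, ".... ..".toList), ("S".toList, ".... ...".toList),
   ("T".toList, ".... ....".toList), ("U".toList, ".... .....".toList),
   ("V".toList, "..... .".toList), ("W".toList, "..... ..".toList), ("X".toList, "..... ...".toList),
   ("Y".toList, "..... ....".toList), ("Z".toList, "..... .....".toList)]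

def tapDic : PySem.Dict (List Char) (List Char) := PySem.Dict.ofList tapPairs

-- {v : k for k, v in dic.items() if k != "K"}
def tapInv : PySem.Dict (List Char) (List Char) :=
  (tapDic.items.filter (fun kv => !(kv.1 == "K".toList))).foldl
    (fun d kv => d.insert kv.2 kv.1) PySem.Dict.empty

-- one iteration of A's decode loop; state = (r, e, one).
-- Dict lookup dic[e] is getD with default []: Python raises KeyError there, excluded by Pre_.
def tapStepA (d : PySem.Dict (List Char) (List Char))
    (s : List Char × List Char × Bool) (i : Char) : List Char × List Char × Bool :=
  if (i == ' ') && s.2.2 then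
    (s.1 ++ PySem.Chars.lower (d.getD s.2.1 []), [], false)
  else if i == ' ' then
    (s.1, s.2.1 ++ [i], true)
  else
    (s.1, s.2.1 ++ [i], s.2.2)

def tap_code (text : String) : String :=
  let s := text.toList
  let r : List Char :=
    if PySem.Chars.isIn ".".toList s then
      -- e, one = "", False; for i in text: …; r += dic[e].lower() + " "
      let fin := s.foldl (tapStepA tapInv) (([] : List Char), ([] : List Char), false)
      fin.1 ++ PySem.Chars.lower (tapInv.getD fin.2.1 []) ++ [' ']
    else
      -- text = text.upper(); for i in text: r += dic[i] + " "
      (PySem.Chars.upper s).foldl (fun r i => r ++ tapDic.getD [i] [] ++ [' ']) []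
  String.ofList (PySem.Chars.slice r none (some (-1)))      -- r[:-1]

-- ===== PORT B =====
def tapAlpha : List Char := "ABCDEFGHIJLMNOPQRSTUVWXYZ".toList

-- for i in range(0, len(toks), 2): out += ALPHA[(len(toks[i])-1)*5 + (len(toks[i+1])-1)].lower()
-- ALPHA[idx] is Python indexing (negative wraps): PySem.List.pyGet?, none = IndexError (excluded by Pre_);
-- a lone leftover token (toks[i+1] IndexError) is likewise excluded by Pre_.
def tapPairLoop : List (List Char) → List Char
  | t1 :: t2 :: rest =>
      (match PySem.List.pyGet? tapAlpha (((t1.length : Int) - 1) * 5 + ((t2.length : Int) - 1)) with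
        | some ch => [PySem.Chars.lowerChar ch]
        | none => []) ++ tapPairLoop rest
  | _ => []

-- idx = ALPHA.index("C" if c == "K" else c); "."*(idx//5+1) + " " + "."*(idx%5+1)
-- .index raises ValueError when absent (getD 0 placeholder): excluded by Pre_; idx ≥ 0, so // and % are Nat / and %.
def tapEncChar (c : Char) : List Char :=
  let idx := (PySem.List.index? tapAlpha (if c == 'K' then 'C' else c)).getD 0
  List.replicate (idx / 5 + 1) '.' ++ [' '] ++ List.replicate (idx % 5 + 1) '.'

def tap_code_alt (text : String) : String :=
  let s := text.toList
  if PySem.Chars.isIn ".".toList s then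
    String.ofList (tapPairLoop (PySem.Chars.splitOn s " ".toList))
  else
    String.ofList (PySem.Chars.join [' '] ((PySem.Chars.upper s).map tapEncChar))

-- ===== PRECONDITION & SPEC =====
-- the 25 tap codes (values of A's dict literal; "C"/"K" share one)
def tapCodes : List (List Char) :=
  [". .".toList, ". ..".toList, ". ...".toList, ". ....".toList, ". .....".toList,
   ".. .".toList, ".. ..".toList, ".. ...".toList, ".. ....".toList, ".. .....".toList,
   "... .".toList, "... ..".toList, "... ...".toList, "... ....".toList, "... .....".toList,
   ".... .".toList, ".... ..".toList, ".... ...".toList, ".... ....".toList, ".... .....".toList,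
   "..... .".toList, "..... ..".toList, "..... ...".toList, "..... ....".toList, "..... .....".toList]

-- the space-separated tokens pair up, each pair rejoined with one space being a valid tap code
def tapPairsOK : List (List Char) → Bool
  | [] => true
  | [_] => false
  | t1 :: t2 :: rest => tapCodes.contains (t1 ++ ' ' :: t2) && tapPairsOK rest

-- Pre_ excludes exactly the inputs where the Python A raises KeyError: in the decode branch
-- (text contains '.') a text whose space-separated tokens are odd in number or whose consecutive
-- token pairs, rejoined with one space, are not all valid tap codes; in the encode branch a
-- character that is not an ASCII letter.
def Pre_tap_code (text : String) : Prop :=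
  if PySem.Chars.isIn ".".toList text.toList then
    tapPairsOK (PySem.Chars.splitOn text.toList " ".toList) = true
  else ∀ c ∈ text.toList, PySem.Chars.isalpha c = true

instance (text : String) : Decidable (Pre_tap_code text) := by unfold Pre_tap_code; infer_instance

def pvWitness_tap_code : String := ".. ... . ..... ... . ... . ... ...."

def Spec_tap_code (text : String) (out : String) : Prop := out = tap_code_alt text
instance (text : String) (out : String) : Decidable (Spec_tap_code text out) := by unfold Spec_tap_code; infer_instance

-- ===== CLAIM (what is proved, stated in full; the proofs are below) =====
def Claim_equal_tap_code : Prop := ∀ (text : String), Dom_tap_code text → Pre_tap_code text → Spec_tap_code text (tap_code text)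

-- ===== LEMMAS AND PROOFS =====

-- proof-only mirror of A's decode as a pair recursion over the token list
def tapDecodeB (inv : PySem.Dict (List Char) (List Char)) : List (List Char) → List (List Char)
  | [] => []
  | [t1] => [PySem.Chars.lower (inv.getD t1 [])]
  | t1 :: t2 :: rest =>
      PySem.Chars.lower (inv.getD (t1 ++ [' '] ++ t2) []) :: tapDecodeB inv rest

-- single-char split of a char list, with the current (not yet terminated) piece as accumulator
def tapSplit1 (cur : List Char) : List Char → List (List Char)
  | [] => [cur]
  | c :: rest => if c = ' ' then cur :: tapSplit1 [] rest else tapSplit1 (cur ++ [c]) rest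

theorem tapSplitOn_go_eq (l : List Char) : ∀ (fuel : Nat), l.length ≤ fuel →
    ∀ (cur : List Char) (acc : List (List Char)),
    PySem.Chars.splitOn.go " ".toList fuel l cur acc = acc.reverse ++ tapSplit1 cur.reverse l := by
  induction l with
  | nil =>
    intro fuel _ cur acc
    cases fuel <;> simp [PySem.Chars.splitOn.go, tapSplit1]
  | cons c rest ih =>
    intro fuel hf cur acc
    cases fuel with
    | zero => simp at hf
    | succ f =>
      by_cases hc : c = ' '
      · subst hc
        have hp : (" ".toList).isPrefixOf (' ' :: rest) = true := by simp [List.isPrefixOf]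
        simp only [PySem.Chars.splitOn.go, hp, if_pos]
        have hd : List.drop (" ".toList).length (' ' :: rest) = rest := by simp
        rw [hd, ih f (by simpa using hf) [] (cur.reverse :: acc)]
        simp [tapSplit1]
      · have hp : (" ".toList).isPrefixOf (c :: rest) = false := by
          simp [List.isPrefixOf]
          exact fun h => absurd h.symm hc
        simp only [PySem.Chars.splitOn.go, hp, Bool.false_eq_true, if_neg, not_false_iff]
        rw [ih f (by simpa using hf) (c :: cur) acc]
        simp [tapSplit1, hc]

theorem tapSplitOn_eq (s : List Char) :
    PySem.Chars.splitOn s " ".toList = tapSplit1 [] s := by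
  unfold PySem.Chars.splitOn
  rw [tapSplitOn_go_eq s (s.length + 1) (by omega) [] []]
  simp

theorem tapSplit1_ne_nil (cur l) : tapSplit1 cur l ≠ [] := by
  induction l generalizing cur with
  | nil => simp [tapSplit1]
  | cons c rest ih =>
    by_cases hc : c = ' ' <;> simp [tapSplit1, hc, ih]

theorem tapSplit1_join (l : List Char) : ∀ cur, PySem.Chars.join [' '] (tapSplit1 cur l) = cur ++ l := by
  induction l with
  | nil => intro cur; simp [tapSplit1, PySem.Chars.join_singleton]
  | cons c rest ih =>
    intro cur
    by_cases hc : c = ' '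
    · subst hc
      rw [show tapSplit1 cur (' ' :: rest) = cur :: tapSplit1 [] rest from by simp [tapSplit1]]
      obtain ⟨b, bs, hb⟩ := List.exists_cons_of_ne_nil (tapSplit1_ne_nil [] rest)
      rw [hb, PySem.Chars.join_cons_cons, ← hb, ih []]
      simp
    · rw [tapSplit1]
      simp only [if_neg hc]
      rw [ih (cur ++ [c])]
      simp

theorem tapSplit1_nospace (l : List Char) : ∀ cur, ' ' ∉ cur →
    ∀ t ∈ tapSplit1 cur l, ' ' ∉ t := by
  induction l with
  | nil => intro cur hcur t ht; simp [tapSplit1] at ht; subst ht; exact hcur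
  | cons c rest ih =>
    intro cur hcur t ht
    by_cases hc : c = ' '
    · subst hc
      rw [show tapSplit1 cur (' ' :: rest) = cur :: tapSplit1 [] rest from by simp [tapSplit1]] at ht
      rcases List.mem_cons.1 ht with rfl | ht
      · exact hcur
      · exact ih [] (by simp) t ht
    · simp only [tapSplit1, if_neg hc] at ht
      exact ih (cur ++ [c]) (by simp [hcur]; exact fun h => hc h.symm) t ht

theorem tapScan_nospace (d : PySem.Dict (List Char) (List Char)) (u : List Char) (hu : ' ' ∉ u) :
    ∀ (r e : List Char) (one : Bool),
    u.foldl (tapStepA d) (r, e, one) = (r, e ++ u, one) := by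
  induction u with
  | nil => intro r e one; simp
  | cons c t ih =>
    intro r e one
    have hc : (c == ' ') = false := by
      simp only [List.mem_cons] at hu
      simp; exact fun h => hu (Or.inl h.symm)
    rw [List.foldl_cons]
    rw [show tapStepA d (r, e, one) c = (r, e ++ [c], one) by
      simp [tapStepA, hc]]
    rw [ih (by intro h; exact hu (List.mem_cons_of_mem _ h)) r (e ++ [c]) one]
    simp

theorem tapDecodeB_ne_nil (inv) (ts : List (List Char)) (h : ts ≠ []) : tapDecodeB inv ts ≠ [] := by
  match ts with
  | [t1] => simp [tapDecodeB]
  | t1 :: t2 :: rest => simp [tapDecodeB]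

theorem tapStep_space_off (d) (r e : List Char) :
    tapStepA d (r, e, false) ' ' = (r, e ++ [' '], true) := by
  simp [tapStepA]

theorem tapStep_space_on (d) (r e : List Char) :
    tapStepA d (r, e, true) ' ' = (r ++ PySem.Chars.lower (d.getD e []), [], false) := by
  simp [tapStepA]

theorem tapScan_main (ts : List (List Char)) :  ts ≠ [] → (∀ t ∈ ts, ' ' ∉ t) →
    ∀ (r : List Char),
    (((PySem.Chars.join [' '] ts).foldl (tapStepA tapInv) (r, ([] : List Char), false)).1 ++
      PySem.Chars.lower (tapInv.getD
        ((PySem.Chars.join [' '] ts).foldl (tapStepA tapInv) (r, ([] : List Char), false)).2.1 []))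
      = r ++ PySem.Chars.join [] (tapDecodeB tapInv ts) := by
  induction ts using tapDecodeB.induct with
  | case1 => intro h; exact absurd rfl h
  | case2 t1 =>
    intro _ hsp r
    rw [PySem.Chars.join_singleton, tapScan_nospace _ t1 (hsp t1 (by simp)) r [] false]
    simp [tapDecodeB, PySem.Chars.join_singleton]
  | case3 t1 t2 rest ih =>
    intro _ hsp r
    have h1 : ' ' ∉ t1 := hsp t1 (by simp)
    have h2 : ' ' ∉ t2 := hsp t2 (by simp)
    rw [PySem.Chars.join_cons_cons]
    rw [List.foldl_append, List.foldl_append]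
    rw [tapScan_nospace _ t1 h1 r [] false]
    rw [show List.foldl (tapStepA tapInv) (r, [] ++ t1, false) [' ']
        = (r, ([] ++ t1) ++ [' '], true) from by
      rw [List.foldl_cons, tapStep_space_off]; rfl]
    match rest with
    | [] =>
      rw [PySem.Chars.join_singleton, tapScan_nospace _ t2 h2 r (([] ++ t1) ++ [' ']) true]
      simp [tapDecodeB, PySem.Chars.join_singleton]
    | x :: xs =>
      rw [PySem.Chars.join_cons_cons, List.foldl_append, List.foldl_append]
      rw [tapScan_nospace _ t2 h2 r (([] ++ t1) ++ [' ']) true]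
      rw [show List.foldl (tapStepA tapInv) (r, (([] ++ t1) ++ [' ']) ++ t2, true) [' ']
          = (r ++ PySem.Chars.lower (tapInv.getD ((([] ++ t1) ++ [' ']) ++ t2) []), [], false) from by
        rw [List.foldl_cons, tapStep_space_on]; rfl]
      rw [ih (by simp) (fun t ht => hsp t (by simp [ht]))]
      obtain ⟨b, bs, hb⟩ := List.exists_cons_of_ne_nil (tapDecodeB_ne_nil tapInv (x :: xs) (by simp))
      rw [show tapDecodeB tapInv (t1 :: t2 :: x :: xs)
          = PySem.Chars.lower (tapInv.getD (t1 ++ [' '] ++ t2) []) :: tapDecodeB tapInv (x :: xs) from rfl]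
      rw [hb, PySem.Chars.join_cons_cons]
      simp

-- token extraction: in t ++ ' ' :: u with ' ' ∉ t, takeWhile/dropWhile recover t and u
theorem tapTok (t u : List Char) (ht : ' ' ∉ t) :
    (t ++ ' ' :: u).takeWhile (fun c => !(c == ' ')) = t ∧
    ((t ++ ' ' :: u).dropWhile (fun c => !(c == ' '))).tail = u := by
  induction t with
  | nil => simp
  | cons c cs ih =>
    have hc : (c == ' ') = false := by
      simp only [List.mem_cons] at ht; simp; exact fun h => ht (Or.inl h.symm)
    have := ih (fun h => ht (List.mem_cons_of_mem _ h))
    simp [hc, this.1, this.2]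

-- the per-pair fact: A's inverted-dict lookup equals B's dot-count arithmetic on every valid code
theorem tapPair_ok (t1 t2 : List Char) (h1 : ' ' ∉ t1) (h2 : ' ' ∉ t2)
    (h : tapCodes.contains (t1 ++ ' ' :: t2) = true) :
    PySem.Chars.lower (tapInv.getD (t1 ++ [' '] ++ t2) []) =
      (match PySem.List.pyGet? tapAlpha (((t1.length : Int) - 1) * 5 + ((t2.length : Int) - 1)) with
        | some ch => [PySem.Chars.lowerChar ch]
        | none => []) := by
  rw [List.contains_eq_mem] at h
  simp only [tapCodes, decide_eq_true_eq, List.mem_cons, List.not_mem_nil, or_false] at h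
  rcases h with h|h|h|h|h|h|h|h|h|h|h|h|h|h|h|h|h|h|h|h|h|h|h|h|h <;>
  · have e1 := (tapTok t1 t2 h1).1
    have e2 := (tapTok t1 t2 h1).2
    rw [h] at e1 e2
    subst e1; subst e2
    decide

-- B's pair loop equals A's pair-wise decode on a valid token list
theorem tapBridge (ts : List (List Char)) (hsp : ∀ t ∈ ts, ' ' ∉ t)
    (hok : tapPairsOK ts = true) :
    PySem.Chars.join [] (tapDecodeB tapInv ts) = tapPairLoop ts := by
  induction ts using tapPairsOK.induct with
  | case1 => simp [tapDecodeB, tapPairLoop, PySem.Chars.join_nil]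
  | case2 t1 => simp [tapPairsOK] at hok
  | case3 t1 t2 rest ih =>
    simp only [tapPairsOK, Bool.and_eq_true] at hok
    have hp := tapPair_ok t1 t2 (hsp t1 (by simp)) (hsp t2 (by simp)) hok.1
    have hrest := ih (fun t ht => hsp t (by simp [ht])) hok.2
    rw [show tapDecodeB tapInv (t1 :: t2 :: rest)
        = PySem.Chars.lower (tapInv.getD (t1 ++ [' '] ++ t2) []) :: tapDecodeB tapInv rest from rfl]
    rw [show tapPairLoop (t1 :: t2 :: rest)
        = (match PySem.List.pyGet? tapAlpha (((t1.length : Int) - 1) * 5 + ((t2.length : Int) - 1)) with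
            | some ch => [PySem.Chars.lowerChar ch]
            | none => []) ++ tapPairLoop rest from rfl]
    match hr : tapDecodeB tapInv rest with
    | [] => rw [PySem.Chars.join_singleton, hp, ← hrest, hr, PySem.Chars.join_nil, List.append_nil]
    | b :: bs => rw [PySem.Chars.join_cons_cons, hp, ← hrest, hr]; simp

-- encode: for every char of the K-less uppercase alphabet the dict lookup equals the arithmetic code
theorem tapEncRange : ∀ n ∈ List.range' 65 26,
    tapDic.getD [Char.ofNat n] [] = tapEncChar (Char.ofNat n) := by decide

theorem tapCharLe (a b : Char) : a ≤ b ↔ a.toNat ≤ b.toNat := by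
  rw [Char.le_def, UInt32.le_iff_toNat_le]; exact Iff.rfl

theorem tapEncUpper (c : Char) (h : PySem.Chars.isalpha c = true) :
    tapDic.getD [PySem.Chars.upperChar c] [] = tapEncChar (PySem.Chars.upperChar c) := by
  simp only [PySem.Chars.isalpha, PySem.Chars.isupper, PySem.Chars.islower, Bool.or_eq_true,
    Bool.and_eq_true, decide_eq_true_eq] at h
  unfold PySem.Chars.upperChar
  rcases h with ⟨hA, hZ⟩ | ⟨ha, hz⟩
  · have hA' : 65 ≤ c.toNat := (tapCharLe 'A' c).1 hA
    have hZ' : c.toNat ≤ 90 := (tapCharLe c 'Z').1 hZ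
    have hlow : PySem.Chars.islower c = false := by
      by_cases hl : PySem.Chars.islower c = true
      · exfalso
        simp only [PySem.Chars.islower, Bool.and_eq_true, decide_eq_true_eq] at hl
        have h97 : (97 : Nat) ≤ c.toNat := (tapCharLe 'a' c).1 hl.1
        omega
      · simpa using hl
    rw [if_neg (by simp [hlow])]
    rw [← Char.ofNat_toNat c]
    exact tapEncRange c.toNat (List.mem_range'_1.2 ⟨hA', by omega⟩)
  · have ha' : 97 ≤ c.toNat := (tapCharLe 'a' c).1 ha
    have hz' : c.toNat ≤ 122 := (tapCharLe c 'z').1 hz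
    rw [if_pos (by simp [PySem.Chars.islower, ha, hz])]
    exact tapEncRange (c.toNat - 32) (List.mem_range'_1.2 ⟨by omega, by omega⟩)

theorem tapFlat_dropLast (g : Char → List Char) (l : List Char) :
    (l.flatMap (fun i => g i ++ [' '])).dropLast = PySem.Chars.join [' '] (l.map g) := by
  induction l with
  | nil => simp [PySem.Chars.join_nil]
  | cons a t ih =>
    match t with
    | [] => simp [PySem.Chars.join_singleton]
    | b :: bs =>
      rw [List.flatMap_cons, List.dropLast_append_of_ne_nil (l := (b :: bs).flatMap (fun i => g i ++ [' '])) (by simp [List.flatMap_cons])]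
      rw [ih, List.map_cons, List.map_cons]
      rw [show (g a ++ [' ']) ++ (PySem.Chars.join [' '] (g b :: bs.map g)) =
        g a ++ [' '] ++ PySem.Chars.join [' '] (g b :: bs.map g) from by simp]
      rw [← PySem.Chars.join_cons_cons]
      simp

theorem tapEncode_join (g : Char → List Char) (l : List Char) :
    (l.foldl (fun r i => r ++ g i ++ [' ']) []).dropLast
      = PySem.Chars.join [' '] (l.map g) := by
  rw [PySem.List.foldl_congr_mem l _ (fun r i => r ++ (g i ++ [' '])) []
    (fun acc x _ => by simp)]
  rw [PySem.List.foldl_append_eq_flatMap (fun i => g i ++ [' ']) l []]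
  simpa using tapFlat_dropLast g l

-- ===== VERDICT (by name: the statement is the Claim_ definition above) =====
theorem tap_code_spec : Claim_equal_tap_code := by
  intro text _ hpre
  unfold Spec_tap_code tap_code tap_code_alt
  unfold Pre_tap_code at hpre
  by_cases h : PySem.Chars.isIn ".".toList text.toList = true
  · simp only [h, if_true] at hpre ⊢
    have hts := tapSplitOn_eq text.toList
    rw [hts] at hpre
    have hnsp := tapSplit1_nospace text.toList [] (by simp)
    have main := tapScan_main (tapSplit1 [] text.toList)
      (tapSplit1_ne_nil [] text.toList) hnsp []
    rw [tapSplit1_join text.toList []] at main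
    simp only [List.nil_append] at main
    rw [hts, PySem.Chars.slice_eq_listSlice, PySem.List.slice_to_neg_one,
      List.dropLast_concat, main, tapBridge _ hnsp hpre]
  · simp only [h, if_false, Bool.false_eq_true] at hpre ⊢
    rw [PySem.Chars.slice_eq_listSlice, PySem.List.slice_to_neg_one,
      tapEncode_join (fun i => tapDic.getD [i] []) (PySem.Chars.upper text.toList)]
    have hmap : (PySem.Chars.upper text.toList).map (fun i => tapDic.getD [i] [])
        = (PySem.Chars.upper text.toList).map tapEncChar := by
      unfold PySem.Chars.upper
      rw [List.map_map, List.map_map]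
      exact List.map_congr_left (fun c hc => tapEncUpper c (hpre c hc))
    rw [hmap]
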